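-- pv_equiv track=rewrite | github.com/pstites/spelling-bee-multiplayer | puzzle-generator/generator.py | find_best_center
-- ===== SOURCE A (Python) =====
-- MIN_WORD_LENGTH = 4
--
-- def is_valid_word(word, center, letters):
--     """Check if a word qualifies for a given puzzle."""
--     letter_set = set(letters)
--     return (
--         len(word) >= MIN_WORD_LENGTH
--         and center in word
--         and all(c in letter_set for c in word)
--     )
--
-- def find_best_center(pangram_letters, wordlist):
--     """
--     Choose the center letter that produces the most valid words.
--     """
--     best_center = None
--     best_count = 0
--     for candidate in pangram_letters:
--         count = sum(
--             1 for w in wordlist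
--             if is_valid_word(w, candidate, pangram_letters)
--         )
--         if count > best_count:
--             best_count = count
--             best_center = candidate
--     return best_center, best_count
-- ===== SOURCE B (Python) =====
-- MIN_WORD_LENGTH = 4
--
-- def find_best_center(pangram_letters, wordlist):
--     """Single pass over wordlist: tally, per letter, how many valid words contain it."""
--     letter_set = set(pangram_letters)
--     counts = {}
--     for w in wordlist:
--         if len(w) >= MIN_WORD_LENGTH and all(c in letter_set for c in w):
--             for c in set(w):
--                 counts[c] = counts.get(c, 0) + 1
--     best_center, best_count = None, 0
--     for cand in pangram_letters:
--         n = counts.get(cand, 0)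
--         if n > best_count:
--             best_center, best_count = cand, n
--     return best_center, best_count
-- ===== Notes on version B (the rewrite author's own statement) =====
-- stated objective: faster
-- what changed: B makes one pass over the wordlist, tallying in a dict how many valid words contain each letter, instead of rescanning the whole wordlist for every candidate center letter.
import Mathlib
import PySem

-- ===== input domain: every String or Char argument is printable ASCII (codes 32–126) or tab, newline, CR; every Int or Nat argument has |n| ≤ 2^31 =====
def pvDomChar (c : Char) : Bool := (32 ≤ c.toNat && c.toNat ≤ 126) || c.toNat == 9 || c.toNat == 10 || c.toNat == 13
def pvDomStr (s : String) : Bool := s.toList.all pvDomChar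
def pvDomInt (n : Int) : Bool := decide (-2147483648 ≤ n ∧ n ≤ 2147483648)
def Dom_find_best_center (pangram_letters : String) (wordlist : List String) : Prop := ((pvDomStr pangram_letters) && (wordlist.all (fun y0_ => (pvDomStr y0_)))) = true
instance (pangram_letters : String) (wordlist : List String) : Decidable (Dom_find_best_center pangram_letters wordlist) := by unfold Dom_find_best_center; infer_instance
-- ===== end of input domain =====

-- B replaces A's per-candidate rescans of the wordlist by one pass that tallies, per letter,
-- how many valid words contain it (objective: faster, O(L*W*k) -> O(W*k + L)).

-- ===== PORT A =====
def is_valid_word (word : String) (center : Char) (letters : String) : Bool :=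
  let letter_set := PySem.Set.ofList letters.toList
  decide (word.toList.length ≥ 4) && word.toList.contains center
    && word.toList.all (fun c => letter_set.contains c)

def find_best_center (pangram_letters : String) (wordlist : List String) : Option String × Int :=
  let r := pangram_letters.toList.foldl
    (fun (st : Option Char × Int) candidate =>
      let count : Int :=
        ((wordlist.filter (fun w => is_valid_word w candidate pangram_letters)).length : Int)
      if count > st.2 then (some candidate, count) else st)
    (none, 0)
  (r.1.map (fun c => String.ofList [c]), r.2)

-- ===== PORT B =====
def fbcAltCounts (letter_set : PySem.Set Char) (wordlist : List String) : PySem.Dict Char Int :=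
  wordlist.foldl
    (fun d w =>
      if decide (w.toList.length ≥ 4) && w.toList.all (fun c => letter_set.contains c) then
        (PySem.Set.ofList w.toList).foldl (fun d c => d.insert c (d.getD c 0 + 1)) d
      else d)
    PySem.Dict.empty

def find_best_center_alt (pangram_letters : String) (wordlist : List String) : Option String × Int :=
  let counts := fbcAltCounts (PySem.Set.ofList pangram_letters.toList) wordlist
  let r := pangram_letters.toList.foldl
    (fun (st : Option Char × Int) cand =>
      let n := counts.getD cand 0
      if n > st.2 then (some cand, n) else st)
    (none, 0)
  (r.1.map (fun c => String.ofList [c]), r.2)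

-- ===== PRECONDITION & SPEC =====
def Spec_find_best_center (pangram_letters : String) (wordlist : List String) (out : Option String × Int) : Prop := out = find_best_center_alt pangram_letters wordlist
instance (pangram_letters : String) (wordlist : List String) (out : Option String × Int) : Decidable (Spec_find_best_center pangram_letters wordlist out) := by unfold Spec_find_best_center; infer_instance

-- ===== CLAIM (what is proved, stated in full; the proofs are below) =====
def Claim_equal_find_best_center : Prop := ∀ (pangram_letters : String) (wordlist : List String), Dom_find_best_center pangram_letters wordlist → Spec_find_best_center pangram_letters wordlist (find_best_center pangram_letters wordlist)

-- ===== LEMMAS AND PROOFS =====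

-- the tally dict counts, for each letter c, the valid words containing c
theorem fbcAltCounts_getD (ls : PySem.Set Char) (wordlist : List String) (c : Char) :
    (fbcAltCounts ls wordlist).getD c 0 =
      ((wordlist.filter (fun w =>
          (decide (w.toList.length ≥ 4) && w.toList.all (fun ch => ls.contains ch))
            && w.toList.contains c)).length : Int) := by
  suffices h : ∀ (wl : List String) (d : PySem.Dict Char Int),
      (wl.foldl (fun d w =>
        if decide (w.toList.length ≥ 4) && w.toList.all (fun ch => ls.contains ch) then
          (PySem.Set.ofList w.toList).foldl (fun d c => d.insert c (d.getD c 0 + 1)) d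
        else d) d).getD c 0 =
      d.getD c 0 + ((wl.filter (fun w =>
          (decide (w.toList.length ≥ 4) && w.toList.all (fun ch => ls.contains ch))
            && w.toList.contains c)).length : Int) by
    have := h wordlist PySem.Dict.empty
    simpa [fbcAltCounts, PySem.Dict.getD_empty] using this
  intro wl
  induction wl with
  | nil => intro d; simp
  | cons w ws ih =>
    intro d
    simp only [List.foldl_cons, List.filter_cons]
    by_cases hv : (decide (w.toList.length ≥ 4) && w.toList.all (fun ch => ls.contains ch)) = true
    · rw [if_pos hv, ih, PySem.Dict.getD_foldl_insert_add_one]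
      have hcnt : ((PySem.Set.ofList w.toList).count c : Int) =
          if w.toList.contains c = true then 1 else 0 := by
        by_cases hm : c ∈ w.toList
        · have h1 : (PySem.Set.ofList w.toList).count c = 1 :=
            List.count_eq_one_of_mem (PySem.Set.nodup_ofList _)
              ((PySem.Set.mem_ofList _ _).2 hm)
          simp [h1, hm]
        · have h0 : (PySem.Set.ofList w.toList).count c = 0 :=
            List.count_eq_zero.2 (fun hc => hm ((PySem.Set.mem_ofList _ _).1 hc))
          simp [h0, hm]
      rw [hcnt]
      by_cases hc : w.toList.contains c = true
      · rw [if_pos hc,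
          if_pos (show ((decide (w.toList.length ≥ 4) && w.toList.all (fun ch => ls.contains ch))
            && w.toList.contains c) = true by rw [hv, hc]; rfl)]
        simp only [List.length_cons]
        push_cast
        ring
      · rw [if_neg hc, if_neg (by
          simp only [Bool.and_eq_true, not_and]
          exact fun _ h2 => hc h2)]
        ring
    · rw [if_neg hv, ih, if_neg (by
        simp only [Bool.and_eq_true, not_and]
        exact fun h1 _ => hv ((Bool.and_eq_true _ _) ▸ h1))]

-- A's per-candidate count equals B's tally lookup
theorem count_eq (pangram_letters : String) (wordlist : List String) (cand : Char) :
    ((wordlist.filter (fun w => is_valid_word w cand pangram_letters)).length : Int) =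
      (fbcAltCounts (PySem.Set.ofList pangram_letters.toList) wordlist).getD cand 0 := by
  rw [fbcAltCounts_getD]
  congr 2
  apply List.filter_congr
  intro w _
  simp only [is_valid_word]
  cases h1 : decide (w.toList.length ≥ 4) <;>
    cases h2 : w.toList.contains cand <;>
    cases h3 : w.toList.all (fun c => (PySem.Set.ofList pangram_letters.toList).contains c) <;>
    simp [h1, h2, h3]

-- ===== VERDICT (by name: the statement is the Claim_ definition above) =====
theorem find_best_center_spec : Claim_equal_find_best_center := by
  intro pl wl _
  unfold Spec_find_best_center find_best_center find_best_center_alt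
  have : (pl.toList.foldl
      (fun (st : Option Char × Int) candidate =>
        let count : Int := ((wl.filter (fun w => is_valid_word w candidate pl)).length : Int)
        if count > st.2 then (some candidate, count) else st) (none, 0)) =
    (pl.toList.foldl
      (fun (st : Option Char × Int) cand =>
        let n := (fbcAltCounts (PySem.Set.ofList pl.toList) wl).getD cand 0
        if n > st.2 then (some cand, n) else st) (none, 0)) := by
    apply PySem.List.foldl_congr_mem
    intro acc x _
    simp only [count_eq]
  simp only [this]
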